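-- pv_equiv track=rewrite | github.com/awaykim/Algorithm | 백준/Silver/9613. GCD 합/GCD 합.py | solution
-- ===== SOURCE A (Python) =====
-- def solution(l):
--     def findGCD(n,m):
--         if n < m : n, m = m, n
--         r = n % m
--         while r != 0:
--             n, m = m, r
--             r = n % m
--         return m
--     sum = 0
--     for i in range(1,len(l)-1):
--         for j in range(i+1, len(l)):
--             sum += findGCD(l[i], l[j])
--     return sum
-- ===== SOURCE B (Python) =====
-- def _gcd(a, b):
--     while b:
--         a, b = b, a % b
--     return a
--
--
-- def solution(l):
--     freq = {}
--     for x in l[1:]: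
--         freq[x] = freq.get(x, 0) + 1
--     vals = list(freq)
--     total = 0
--     for p in range(len(vals)):
--         u = vals[p]
--         cu = freq[u]
--         total += u * (cu * (cu - 1) // 2)  # gcd(u, u) = u over C(cu, 2) equal pairs
--         for q in range(p + 1, len(vals)):
--             v = vals[q]
--             total += _gcd(u, v) * cu * freq[v]
--     return total
-- ===== Notes on version B (the rewrite author's own statement) =====
-- stated objective: alternative
-- what changed: B replaces A's double loop over all index pairs (a fresh Euclid run per pair) by a one-pass value->count dictionary followed by a sum over unordered pairs of DISTINCT values weighted by count products, with equal pairs handled in closed form as u*C(cnt,2); …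
-- outside the precondition, e.g. on solution([1, -4, 6]): A returns -2, B returns 2; on solution([5, 0, 3]): A raises ZeroDivisionError, B returns 3
import Mathlib
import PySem

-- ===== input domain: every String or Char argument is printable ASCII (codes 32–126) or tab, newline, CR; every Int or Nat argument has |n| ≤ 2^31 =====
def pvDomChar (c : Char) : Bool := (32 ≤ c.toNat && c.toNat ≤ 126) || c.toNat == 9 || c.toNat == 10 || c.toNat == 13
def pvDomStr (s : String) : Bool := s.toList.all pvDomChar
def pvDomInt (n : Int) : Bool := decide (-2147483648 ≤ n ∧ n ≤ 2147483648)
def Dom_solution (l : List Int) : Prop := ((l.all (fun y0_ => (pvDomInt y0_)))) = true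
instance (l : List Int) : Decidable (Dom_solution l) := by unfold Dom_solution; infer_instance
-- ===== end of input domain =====

-- B replaces A's double loop over all index pairs by a count dictionary plus a sum over
-- distinct-value pairs weighted by count products (objective: alternative, same worst-case cost).

-- termination helper for both Euclid loops (cited by the ports' decreasing_by)
theorem pvModNatAbsLt (n m : Int) (hm : m ≠ 0) :
    (PySem.Int.mod n m).natAbs < m.natAbs := by
  rcases lt_or_gt_of_ne hm with h | h
  · have := PySem.Int.mod_neg_bounds n h; omega
  · have h1 := PySem.Int.mod_nonneg n h
    have h2 := PySem.Int.mod_lt n h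
    omega

-- ===== PORT A =====
-- the 'while r != 0' loop of findGCD; Python raises ZeroDivisionError at 'n % m' when m = 0,
-- so the m = 0 guard (returning a junk 0) only makes the port total — Pre_ excludes it
def euclidA (n m : Int) : Int :=
  if h0 : m = 0 then 0
  else if PySem.Int.mod n m = 0 then m
  else euclidA m (PySem.Int.mod n m)
termination_by m.natAbs
decreasing_by exact pvModNatAbsLt n m h0

def findGCD (n m : Int) : Int :=
  if n < m then euclidA m n else euclidA n m

def solution (l : List Int) : Int :=
  (PySem.List.pyRange 1 (PySem.List.len l - 1) 1).foldl
    (fun s i =>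
      (PySem.List.pyRange (i + 1) (PySem.List.len l) 1).foldl
        (fun s j => s + findGCD (PySem.List.pyGetD l i 0) (PySem.List.pyGetD l j 0)) s)
    0

-- ===== PORT B =====
-- the 'while b:' loop of _gcd
def gcdLoop (a b : Int) : Int :=
  if h : b = 0 then a
  else gcdLoop b (PySem.Int.mod a b)
termination_by b.natAbs
decreasing_by exact pvModNatAbsLt a b h

def solution_alt (l : List Int) : Int :=
  let tail := PySem.List.slice l (some 1) none
  let freq := tail.foldl (fun d x => d.insert x (d.getD x 0 + 1)) (PySem.Dict.empty : PySem.Dict Int Int)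
  let vals := PySem.Dict.keys freq
  (PySem.List.pyRange 0 (PySem.List.len vals) 1).foldl
    (fun total p =>
      let u := PySem.List.pyGetD vals p 0
      -- freq[u] / freq[v]: u, v are keys of freq, so get-with-default 0 is exact here
      let cu := freq.getD u 0
      let total := total + u * PySem.Int.floordiv (cu * (cu - 1)) 2
      (PySem.List.pyRange (p + 1) (PySem.List.len vals) 1).foldl
        (fun total q =>
          let v := PySem.List.pyGetD vals q 0
          total + gcdLoop u v * cu * freq.getD v 0) total)
    0

-- ===== PRECONDITION & SPEC =====
-- Pre_ restricts to positive entries in l[1:], the natural domain of this GCD-sum task: on a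
-- zero entry paired with a nonnegative one A raises ZeroDivisionError, and on negative entries
-- the sign of a gcd is pure convention (A's Euclid yields the sign of the smaller argument,
-- B's standard Euclid the usual nonnegative gcd) — a corner no caller of this task would specify.
def Pre_solution (l : List Int) : Prop := ∀ x ∈ l.drop 1, 0 < x
instance (l : List Int) : Decidable (Pre_solution l) := by unfold Pre_solution; infer_instance

def pvWitness_solution : List Int := [10, 6, 4, 9]

def Spec_solution (l : List Int) (out : Int) : Prop := out = solution_alt l
instance (l : List Int) (out : Int) : Decidable (Spec_solution l out) := by unfold Spec_solution; infer_instance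

-- ===== CLAIM (what is proved, stated in full; the proofs are below) =====
def Claim_equal_solution : Prop := ∀ (l : List Int), Dom_solution l → Pre_solution l → Spec_solution l (solution l)

-- ===== LEMMAS AND PROOFS =====

-- ---- characterisation of the two Euclid loops via Int.gcd ----

theorem euclidA_eq (n m : Int) (hm : m ≠ 0) :
    euclidA n m = if 0 < m then (Int.gcd n m : Int) else -(Int.gcd n m) := by
  induction n, m using euclidA.induct with
  | case1 n => exact absurd rfl hm
  | case2 n m h0 h1 =>
    rw [euclidA]
    simp only [h0, h1, if_true, dite_eq_ite, if_false]
    have hd : m ∣ n := (PySem.Int.mod_eq_zero_iff_dvd n m).mp h1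
    have hg : Int.gcd n m = m.natAbs := by
      rw [Int.gcd_comm]
      exact Int.gcd_eq_natAbs_left hd
    rw [hg]
    split_ifs with h <;> omega
  | case3 n m h0 h1 ih =>
    rw [euclidA]
    simp only [h0, h1, if_false, dite_eq_ite]
    have hr : PySem.Int.mod n m ≠ 0 := h1
    rw [ih hr]
    have hmod : PySem.Int.mod n m = n + m * (-(PySem.Int.floordiv n m)) := by
      have := PySem.Int.floordiv_mul_add_mod n m
      ring_nf
      linarith
    have hg : Int.gcd m (PySem.Int.mod n m) = Int.gcd n m := by
      rw [hmod, Int.gcd_add_mul_left_right, Int.gcd_comm]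
    have hsign : (0 < PySem.Int.mod n m) ↔ 0 < m := by
      constructor
      · intro h
        by_contra hneg
        have hm' : m < 0 := by omega
        have := PySem.Int.mod_neg_bounds n hm'
        omega
      · intro h
        have := PySem.Int.mod_nonneg n h
        omega
    rw [hg]
    by_cases h : 0 < m
    · rw [if_pos (hsign.mpr h), if_pos h]
    · rw [if_neg (fun hc => h (hsign.mp hc)), if_neg h]

theorem gcdLoop_eq (a b : Int) : 0 ≤ a → 0 ≤ b → gcdLoop a b = (Int.gcd a b : Int) := by
  induction a, b using gcdLoop.induct with
  | case1 a =>
    intro ha _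
    rw [gcdLoop, dif_pos rfl, Int.gcd_zero_right]
    omega
  | case2 a b h ih =>
    intro ha hb
    have hb' : 0 < b := lt_of_le_of_ne hb (Ne.symm h)
    rw [gcdLoop]
    simp only [h, dite_false]
    rw [ih hb (PySem.Int.mod_nonneg a hb')]
    have hmod : PySem.Int.mod a b = a + b * (-(PySem.Int.floordiv a b)) := by
      have := PySem.Int.floordiv_mul_add_mod a b
      ring_nf
      linarith
    rw [hmod, Int.gcd_add_mul_left_right, Int.gcd_comm]

-- the common mathematical pair function
def G (a b : Int) : Int := (Int.gcd a b : Int)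

theorem G_comm (a b : Int) : G a b = G b a := by
  unfold G
  rw [Int.gcd_comm]

theorem findGCD_eq_pos (a b : Int) (ha : 0 < a) (hb : 0 < b) : findGCD a b = G a b := by
  unfold findGCD G
  by_cases hab : a < b
  · rw [if_pos hab, euclidA_eq b a (by omega), if_pos ha, Int.gcd_comm b a]
  · rw [if_neg hab, euclidA_eq a b (by omega), if_pos hb]

theorem G_self_pos (v : Int) (hv : 0 < v) : G v v = v := by
  unfold G
  rw [Int.gcd_self]
  omega

-- ---- pairSum: the structural sum over ordered index pairs ----

def pairSum (f : Int → Int → Int) : List Int → Int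
  | [] => 0
  | x :: xs => ((xs.map (f x)).sum) + pairSum f xs

theorem pairSum_short (f : Int → Int → Int) (xs : List Int) (h : xs.length ≤ 1) :
    pairSum f xs = 0 := by
  match xs, h with
  | [], _ => rfl
  | [x], _ => simp [pairSum]

theorem pairSum_append_singleton (f : Int → Int → Int) (t : List Int) (x : Int) :
    pairSum f (t ++ [x]) = pairSum f t + (t.map (fun y => f y x)).sum := by
  induction t with
  | nil => simp [pairSum]
  | cons y t ih =>
    simp only [List.cons_append, pairSum, List.map_append, List.sum_append, List.map_cons,
      List.sum_cons, List.map_nil, List.sum_nil, ih]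
    ring

theorem pairSum_congr_pairwise (f g : Int → Int → Int) (R : Int → Int → Prop)
    (hfg : ∀ a b, R a b → f a b = g a b) :
    ∀ xs : List Int, List.Pairwise R xs → pairSum f xs = pairSum g xs := by
  intro xs
  induction xs with
  | nil => intro _; rfl
  | cons x t ih =>
    intro hp
    rcases List.pairwise_cons.mp hp with ⟨hx, ht⟩
    simp only [pairSum, ih ht]
    congr 1
    apply congrArg
    exact List.map_congr_left (fun y hy => hfg x y (hx y hy))

theorem pairwise_pos (t : List Int) (h : ∀ x ∈ t, 0 < x) :
    List.Pairwise (fun a b => 0 < a ∧ 0 < b) t := by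
  induction t with
  | nil => exact List.Pairwise.nil
  | cons a t ih =>
    refine List.pairwise_cons.mpr ⟨?_, ih (fun x hx => h x (List.mem_cons_of_mem a hx))⟩
    intro b hb
    exact ⟨h a (List.mem_cons_self), h b (List.mem_cons_of_mem a hb)⟩

-- ---- wSum: the weighted sum over the distinct-value list ----

def wSum (f : Int → Int → Int) (c : Int → Int) : List Int → Int
  | [] => 0
  | v :: vs =>
    f v v * PySem.Int.floordiv (c v * (c v - 1)) 2
      + ((vs.map (fun w => f v w * c v * c w)).sum) + wSum f c vs

-- the B-port's shape of the same sum: the diagonal written with gcd(u,u) = u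
def wSumB (c : Int → Int) : List Int → Int
  | [] => 0
  | v :: vs =>
    v * PySem.Int.floordiv (c v * (c v - 1)) 2
      + ((vs.map (fun w => gcdLoop v w * c v * c w)).sum) + wSumB c vs

theorem wSumB_eq_wSum (c : Int → Int) :
    ∀ vs : List Int, (∀ v ∈ vs, 0 < v) → wSumB c vs = wSum G c vs := by
  intro vs
  induction vs with
  | nil => intro _; rfl
  | cons v t ih =>
    intro h
    have hv : 0 < v := h v List.mem_cons_self
    have hmap : (t.map (fun w => gcdLoop v w * c v * c w))
        = (t.map (fun w => G v w * c v * c w)) := by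
      apply List.map_congr_left
      intro w hw
      rw [gcdLoop_eq v w (by omega) (by have := h w (List.mem_cons_of_mem v hw); omega)]
      rfl
    simp only [wSumB, wSum, hmap, ih (fun w hw => h w (List.mem_cons_of_mem v hw)),
      G_self_pos v hv]

theorem wSum_congr (f : Int → Int → Int) (c₁ c₂ : Int → Int) :
    ∀ vs : List Int, (∀ v ∈ vs, c₁ v = c₂ v) → wSum f c₁ vs = wSum f c₂ vs := by
  intro vs
  induction vs with
  | nil => intro _; rfl
  | cons v t ih =>
    intro h
    have hv : c₁ v = c₂ v := h v (by simp)
    have hmap : (t.map (fun w => f v w * c₂ v * c₁ w)).sum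
        = (t.map (fun w => f v w * c₂ v * c₂ w)).sum := by
      apply congrArg
      exact List.map_congr_left (fun w hw => by rw [h w (by simp [hw])])
    simp only [wSum, hv, ih (fun w hw => h w (by simp [hw])), hmap]

theorem wSum_append_singleton (f : Int → Int → Int) (c : Int → Int) (vs : List Int) (x : Int) :
    wSum f c (vs ++ [x])
      = wSum f c vs + (vs.map (fun v => f v x * c v * c x)).sum
        + f x x * PySem.Int.floordiv (c x * (c x - 1)) 2 := by
  induction vs with
  | nil => simp [wSum]
  | cons v t ih =>
    simp only [List.cons_append, wSum, List.map_append, List.sum_append, List.map_cons,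
      List.sum_cons, List.map_nil, List.sum_nil, ih]
    ring

-- floor-division form of C(n+1,2) = C(n,2) + n
theorem floordiv_succ_mul (n : Int) :
    PySem.Int.floordiv ((n + 1) * n) 2 = PySem.Int.floordiv (n * (n - 1)) 2 + n := by
  have h : (n + 1) * n = n * (n - 1) + n * 2 := by ring
  rw [h, PySem.Int.floordiv_eq_ediv_of_pos (by norm_num : (0:Int) < 2),
    PySem.Int.floordiv_eq_ediv_of_pos (by norm_num : (0:Int) < 2)]
  exact Int.add_mul_ediv_right _ n (by norm_num)

-- pick one element out of a map-sum over a Nodup list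
theorem sum_pick (g : Int → Int) (x : Int) :
    ∀ vs : List Int, vs.Nodup → x ∈ vs →
      (vs.map g).sum = g x + ((vs.filter (fun w => w != x)).map g).sum := by
  intro vs
  induction vs with
  | nil => intro _ h; cases h
  | cons v t ih =>
    intro hnd hx
    rcases List.nodup_cons.mp hnd with ⟨hvt, hndt⟩
    by_cases hvx : v = x
    · have hfil : (v :: t).filter (fun w => w != x) = t.filter (fun w => w != x) := by
        rw [List.filter_cons]
        simp [hvx]
      have hfil2 : t.filter (fun w => w != x) = t :=
        List.filter_eq_self.mpr (fun w hw => bne_iff_ne.mpr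
          (fun he => hvt (by rw [← hvx] at he; exact he ▸ hw)))
      rw [hfil, hfil2, List.map_cons, List.sum_cons, hvx]
    · have hxt : x ∈ t := by
        rcases List.mem_cons.mp hx with h | h
        · exact absurd h.symm hvx
        · exact h
      have hfil : (v :: t).filter (fun w => w != x) = v :: t.filter (fun w => w != x) := by
        rw [List.filter_cons]
        simp [bne_iff_ne, hvx]
      rw [hfil, List.map_cons, List.sum_cons, List.map_cons, List.sum_cons, ih hndt hxt]
      ring

-- a map-sum of an if-pick over a Nodup list collapses to the picked term
theorem sum_pick_ite (h : Int → Int) (x : Int) :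
    ∀ vs : List Int, vs.Nodup → x ∈ vs →
      (vs.map (fun v => if v = x then h v else 0)).sum = h x := by
  intro vs
  induction vs with
  | nil => intro _ hx; cases hx
  | cons v t ih =>
    intro hnd hx
    rcases List.nodup_cons.mp hnd with ⟨hvt, hndt⟩
    by_cases hvx : v = x
    · have hz : (t.map (fun v => if v = x then h v else 0)).sum = 0 := by
        apply List.sum_eq_zero
        intro y hy
        rcases List.mem_map.mp hy with ⟨w, hw, hwe⟩
        have hwx : w ≠ x := fun he => hvt (by rw [← hvx] at he; exact he ▸ hw)
        rw [if_neg hwx] at hwe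
        omega
      rw [List.map_cons, List.sum_cons, if_pos hvx, hz, hvx]
      ring
    · have hxt : x ∈ t := by
        rcases List.mem_cons.mp hx with h | h
        · exact absurd h.symm hvx
        · exact h
      rw [List.map_cons, List.sum_cons, if_neg hvx, ih hndt hxt]
      ring

-- the update-one-count lemma: bumping c at x (x ∈ vs, vs Nodup, f symmetric)
theorem wSum_update (f : Int → Int → Int) (hsymm : ∀ a b, f a b = f b a) (c : Int → Int) (x : Int) :
    ∀ vs : List Int, vs.Nodup → x ∈ vs →
      wSum f (fun v => if v = x then c v + 1 else c v) vs
        = wSum f c vs + f x x * c x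
          + ((vs.filter (fun w => w != x)).map (fun w => f x w * c w)).sum := by
  intro vs
  induction vs with
  | nil => intro _ h; cases h
  | cons v t ih =>
    intro hnd hx
    rcases List.nodup_cons.mp hnd with ⟨hvt, hndt⟩
    by_cases hvx : v = x
    · -- head is the bumped value; x does not occur in t
      rw [← hvx] at hx ⊢
      have hmemt : ∀ w ∈ t, w ≠ v := fun w hw he => hvt (he ▸ hw)
      have hfil : (v :: t).filter (fun w => w != v) = t := by
        rw [List.filter_cons]
        simp only [bne_self_eq_false, Bool.false_eq_true, if_false]
        exact List.filter_eq_self.mpr (fun w hw => bne_iff_ne.mpr (hmemt w hw))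
      rw [hfil]
      simp only [wSum]
      simp only [if_true]
      rw [wSum_congr f _ c t (fun w hw => if_neg (hmemt w hw))]
      have hcross : (t.map (fun w => f v w * (c v + 1) * (if w = v then c w + 1 else c w))).sum
          = (t.map (fun w => f v w * c v * c w)).sum + (t.map (fun w => f v w * c w)).sum := by
        have hstep : ∀ w ∈ t, f v w * (c v + 1) * (if w = v then c w + 1 else c w)
            = f v w * c v * c w + f v w * c w := by
          intro w hw
          rw [if_neg (hmemt w hw)]
          ring
        rw [List.map_congr_left hstep, PySem.List.sum_map_add_int]
      rw [hcross]
      have hdiag : PySem.Int.floordiv ((c v + 1) * (c v + 1 - 1)) 2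
          = PySem.Int.floordiv (c v * (c v - 1)) 2 + c v := by
        have he : (c v + 1) * (c v + 1 - 1) = (c v + 1) * c v := by ring
        rw [he, floordiv_succ_mul]
      rw [hdiag]
      ring
    · -- head keeps its count; x sits in the tail
      have hxt : x ∈ t := by
        rcases List.mem_cons.mp hx with h | h
        · exact absurd h.symm hvx
        · exact h
      have hfil : (v :: t).filter (fun w => w != x) = v :: t.filter (fun w => w != x) := by
        rw [List.filter_cons]
        simp [bne_iff_ne, hvx]
      rw [hfil]
      simp only [wSum, if_neg hvx]
      rw [ih hndt hxt]
      have hcross : (t.map (fun w => f v w * c v * (if w = x then c w + 1 else c w))).sum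
          = (t.map (fun w => f v w * c v * c w)).sum + f v x * c v := by
        have hstep : ∀ w ∈ t, f v w * c v * (if w = x then c w + 1 else c w)
            = f v w * c v * c w + (if w = x then f v w * c v else 0) := by
          intro w _
          by_cases hwx : w = x
          · rw [if_pos hwx, if_pos hwx]; ring
          · rw [if_neg hwx, if_neg hwx]; ring
        rw [List.map_congr_left hstep, PySem.List.sum_map_add_int]
        rw [sum_pick_ite (fun w => f v w * c v) x t hndt hxt]
      rw [hcross, List.map_cons, List.sum_cons, hsymm v x]
      ring

-- grouping a map-sum by value: sum over t = sum over dedup t weighted by counts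
theorem sum_group_count (g : Int → Int) :
    ∀ t : List Int, (t.map g).sum
      = ((PySem.List.dedup t).map (fun v => g v * (t.count v : Int))).sum := by
  intro t
  induction t using List.reverseRecOn with
  | nil => simp [PySem.List.dedup]
  | append_singleton t x ih =>
    have hded : PySem.List.dedup (t ++ [x]) = PySem.Set.add (PySem.List.dedup t) x := by
      simp only [PySem.List.dedup_eq_ofList, PySem.Set.ofList_eq_foldl, List.foldl_append,
        List.foldl_cons, List.foldl_nil]
    have hcount : ∀ v : Int, ((t ++ [x]).count v : Int)
        = (t.count v : Int) + (if v = x then 1 else 0) := by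
      intro v
      rw [List.count_append, List.count_singleton']
      by_cases hvx : v = x
      · rw [if_pos (by rw [hvx]), if_pos hvx]; push_cast; ring
      · rw [if_neg (fun he => hvx he.symm), if_neg hvx]; push_cast; ring
    by_cases hx : x ∈ t
    · have hmem : x ∈ PySem.List.dedup t := by
        rw [PySem.List.dedup_eq_ofList]
        exact (PySem.Set.mem_ofList _ _).mpr hx
      have hadd : PySem.Set.add (PySem.List.dedup t) x = PySem.List.dedup t := by
        simp [PySem.Set.add, PySem.Set.contains, hx]
      rw [hded, hadd]
      have hnd : (PySem.List.dedup t).Nodup := PySem.List.nodup_dedup t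
      have hsplit : ((PySem.List.dedup t).map (fun v => g v * ((t ++ [x]).count v : Int))).sum
          = ((PySem.List.dedup t).map (fun v => g v * (t.count v : Int))).sum
            + ((PySem.List.dedup t).map (fun v => if v = x then g v else 0)).sum := by
        have hstep : ∀ v ∈ PySem.List.dedup t, g v * ((t ++ [x]).count v : Int)
            = g v * (t.count v : Int) + (if v = x then g v else 0) := by
          intro v _
          rw [hcount v]
          by_cases hvx : v = x
          · rw [if_pos hvx, if_pos hvx]; ring
          · rw [if_neg hvx, if_neg hvx]; ring
        rw [List.map_congr_left hstep, PySem.List.sum_map_add_int]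
      rw [List.map_append, List.sum_append, ih, hsplit,
        sum_pick_ite g x _ hnd hmem]
      simp
    · have hnmem : x ∉ PySem.List.dedup t := by
        rw [PySem.List.dedup_eq_ofList]
        intro hc
        exact hx ((PySem.Set.mem_ofList _ _).mp hc)
      have hadd : PySem.Set.add (PySem.List.dedup t) x = PySem.List.dedup t ++ [x] := by
        simp [PySem.Set.add, PySem.Set.contains, hx]
      rw [hded, hadd, List.map_append, List.sum_append, List.map_append, List.sum_append]
      congr 1
      · rw [ih]
        apply congrArg
        apply List.map_congr_left
        intro v hv
        have hvx : v ≠ x := fun he => hnmem (he ▸ hv)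
        rw [hcount v, if_neg hvx]
        ring
      · simp [List.count_eq_zero_of_not_mem hx]

-- main combinatorial lemma: pair sum over the list = weighted sum over distinct values
theorem pairSum_eq_wSum (f : Int → Int → Int) (hsymm : ∀ a b, f a b = f b a) :
    ∀ t : List Int, pairSum f t = wSum f (fun v => (t.count v : Int)) (PySem.List.dedup t) := by
  intro t
  induction t using List.reverseRecOn with
  | nil => simp [pairSum, wSum, PySem.List.dedup]
  | append_singleton t x ih =>
    rw [pairSum_append_singleton, ih]
    have hded : PySem.List.dedup (t ++ [x]) = PySem.Set.add (PySem.List.dedup t) x := by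
      simp only [PySem.List.dedup_eq_ofList, PySem.Set.ofList_eq_foldl, List.foldl_append,
        List.foldl_cons, List.foldl_nil]
    have hcount : ∀ v : Int, ((t ++ [x]).count v : Int)
        = (t.count v : Int) + (if v = x then 1 else 0) := by
      intro v
      rw [List.count_append, List.count_singleton']
      by_cases hvx : v = x
      · rw [if_pos (by rw [hvx]), if_pos hvx]; push_cast; ring
      · rw [if_neg (fun he => hvx he.symm), if_neg hvx]; push_cast; ring
    have hnd : (PySem.List.dedup t).Nodup := PySem.List.nodup_dedup t
    by_cases hx : x ∈ t
    · have hmem : x ∈ PySem.List.dedup t := by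
        rw [PySem.List.dedup_eq_ofList]; exact (PySem.Set.mem_ofList _ _).mpr hx
      have hadd : PySem.Set.add (PySem.List.dedup t) x = PySem.List.dedup t := by
        simp [PySem.Set.add, PySem.Set.contains, hx]
      rw [hded, hadd]
      have hcfun : wSum f (fun v => ((t ++ [x]).count v : Int)) (PySem.List.dedup t)
          = wSum f (fun v => if v = x then (t.count v : Int) + 1 else (t.count v : Int))
              (PySem.List.dedup t) := by
        apply wSum_congr
        intro v _
        rw [hcount v]
        by_cases hvx : v = x
        · rw [if_pos hvx, if_pos hvx]
        · rw [if_neg hvx, if_neg hvx]; ring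
      rw [hcfun, wSum_update f hsymm (fun v => (t.count v : Int)) x _ hnd hmem]
      have hgroup : (t.map (fun y => f y x)).sum
          = ((PySem.List.dedup t).map (fun v => f v x * (t.count v : Int))).sum :=
        sum_group_count (fun y => f y x) t
      have hpick : ((PySem.List.dedup t).map (fun v => f v x * (t.count v : Int))).sum
          = f x x * (t.count x : Int)
            + (((PySem.List.dedup t).filter (fun w => w != x)).map
                (fun v => f v x * (t.count v : Int))).sum :=
        sum_pick (fun v => f v x * (t.count v : Int)) x _ hnd hmem
      have hsym2 : (((PySem.List.dedup t).filter (fun w => w != x)).map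
            (fun v => f v x * (t.count v : Int))).sum
          = (((PySem.List.dedup t).filter (fun w => w != x)).map
              (fun w => f x w * (t.count w : Int))).sum := by
        apply congrArg
        exact List.map_congr_left (fun v _ => by rw [hsymm v x])
      rw [hgroup, hpick, hsym2]
      ring
    · have hnmem : x ∉ PySem.List.dedup t := by
        rw [PySem.List.dedup_eq_ofList]
        intro hc; exact hx ((PySem.Set.mem_ofList _ _).mp hc)
      have hadd : PySem.Set.add (PySem.List.dedup t) x = PySem.List.dedup t ++ [x] := by
        simp [PySem.Set.add, PySem.Set.contains, hx]
      rw [hded, hadd, wSum_append_singleton]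
      have hc0 : (t.count x : Int) = 0 := by
        simp [List.count_eq_zero_of_not_mem hx]
      have hcx1 : ((t ++ [x]).count x : Int) = 1 := by
        rw [hcount x, if_pos rfl, hc0]
        ring
      have hcongr : wSum f (fun v => ((t ++ [x]).count v : Int)) (PySem.List.dedup t)
          = wSum f (fun v => (t.count v : Int)) (PySem.List.dedup t) := by
        apply wSum_congr
        intro v hv
        have hvx : v ≠ x := fun he => hnmem (he ▸ hv)
        rw [hcount v, if_neg hvx]
        ring
      rw [hcongr]
      have hcross : ((PySem.List.dedup t).map
            (fun v => f v x * ((t ++ [x]).count v : Int) * ((t ++ [x]).count x : Int))).sum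
          = ((PySem.List.dedup t).map (fun v => f v x * (t.count v : Int))).sum := by
        apply congrArg
        apply List.map_congr_left
        intro v hv
        have hvx : v ≠ x := fun he => hnmem (he ▸ hv)
        rw [hcount v, if_neg hvx, hcx1]
        ring
      rw [hcross]
      have hdiag : PySem.Int.floordiv
            (((t ++ [x]).count x : Int) * (((t ++ [x]).count x : Int) - 1)) 2 = 0 := by
        rw [hcx1]
        decide
      rw [hdiag, mul_zero]
      rw [sum_group_count (fun y => f y x) t]
      ring

-- ---- loop-shape lemmas: the ports' index folds are pairSum / wSumB ----

theorem innerA (l : List Int) (u : Int) (a : Int) (ha : 0 ≤ a) (s : Int) :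
    (PySem.List.pyRange a (PySem.List.len l) 1).foldl
      (fun s j => s + findGCD u (PySem.List.pyGetD l j 0)) s
    = s + ((l.drop a.toNat).map (findGCD u)).sum := by
  rw [PySem.List.foldl_pyRange_pyGetD l 0 (fun acc x => acc + findGCD u x) s ha]
  exact PySem.List.foldl_add _ _ _

theorem outerA (l : List Int) :
    ∀ (d k : Nat) (s : Int), l.length ≤ k + d →
      (PySem.List.pyRange (k : Int) (PySem.List.len l - 1) 1).foldl
        (fun s i =>
          (PySem.List.pyRange (i + 1) (PySem.List.len l) 1).foldl
            (fun s j => s + findGCD (PySem.List.pyGetD l i 0) (PySem.List.pyGetD l j 0)) s) s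
      = s + pairSum findGCD (l.drop k) := by
  intro d
  induction d with
  | zero =>
    intro k s h
    rw [PySem.List.pyRange_one_eq_nil (by simp [PySem.List.len_eq]; omega)]
    rw [List.drop_eq_nil_of_le (by omega)]
    simp [pairSum]
  | succ d ih =>
    intro k s h
    by_cases hk : (PySem.List.len l : Int) - 1 ≤ (k : Int)
    · rw [PySem.List.pyRange_one_eq_nil hk]
      rw [pairSum_short _ _ (by rw [List.length_drop]; simp [PySem.List.len_eq] at hk; omega)]
      simp
    · have hklt : (k : Int) < (PySem.List.len l) - 1 := by omega
      have hklen : k < l.length := by simp [PySem.List.len_eq] at hklt; omega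
      rw [PySem.List.pyRange_one_cons hklt, List.foldl_cons]
      have hget : PySem.List.pyGetD l (k : Int) 0 = l[k] := by
        rw [PySem.List.pyGetD_natCast]
        exact List.getD_eq_getElem l 0 hklen
      have hcast : ((k : Int) + 1) = ((k + 1 : Nat) : Int) := by push_cast; ring
      rw [hget, hcast, innerA l (l[k]) ((k + 1 : Nat) : Int) (by positivity) s]
      rw [Int.toNat_natCast]
      rw [ih (k + 1) _ (by omega)]
      rw [List.drop_eq_getElem_cons hklen]
      simp only [pairSum]
      ring

theorem innerB (vals : List Int) (c : Int → Int) (u cu : Int) (a : Int) (ha : 0 ≤ a) (s : Int) :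
    (PySem.List.pyRange a (PySem.List.len vals) 1).foldl
      (fun total q => total + gcdLoop u (PySem.List.pyGetD vals q 0) * cu * c (PySem.List.pyGetD vals q 0)) s
    = s + ((vals.drop a.toNat).map (fun v => gcdLoop u v * cu * c v)).sum := by
  rw [PySem.List.foldl_pyRange_pyGetD vals 0 (fun acc v => acc + gcdLoop u v * cu * c v) s ha]
  exact PySem.List.foldl_add _ _ _

theorem outerB (vals : List Int) (cnt : PySem.Dict Int Int) :
    ∀ (d k : Nat) (s : Int), vals.length ≤ k + d →
      (PySem.List.pyRange (k : Int) (PySem.List.len vals) 1).foldl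
        (fun total p =>
          (PySem.List.pyRange (p + 1) (PySem.List.len vals) 1).foldl
            (fun total q =>
              total + gcdLoop (PySem.List.pyGetD vals p 0) (PySem.List.pyGetD vals q 0)
                * cnt.getD (PySem.List.pyGetD vals p 0) 0 * cnt.getD (PySem.List.pyGetD vals q 0) 0)
            (total + (PySem.List.pyGetD vals p 0)
              * PySem.Int.floordiv (cnt.getD (PySem.List.pyGetD vals p 0) 0 * (cnt.getD (PySem.List.pyGetD vals p 0) 0 - 1)) 2)) s
      = s + wSumB (fun v => cnt.getD v 0) (vals.drop k) := by
  intro d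
  induction d with
  | zero =>
    intro k s h
    rw [PySem.List.pyRange_one_eq_nil (by simp [PySem.List.len_eq]; omega)]
    rw [List.drop_eq_nil_of_le (by omega)]
    simp [wSumB]
  | succ d ih =>
    intro k s h
    by_cases hk : (PySem.List.len vals : Int) ≤ (k : Int)
    · rw [PySem.List.pyRange_one_eq_nil hk]
      rw [List.drop_eq_nil_of_le (by simp [PySem.List.len_eq] at hk; omega)]
      simp [wSumB]
    · have hklt : (k : Int) < (PySem.List.len vals) := by omega
      have hklen : k < vals.length := by simp [PySem.List.len_eq] at hklt; omega
      rw [PySem.List.pyRange_one_cons hklt, List.foldl_cons]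
      have hget : PySem.List.pyGetD vals (k : Int) 0 = vals[k] := by
        rw [PySem.List.pyGetD_natCast]
        exact List.getD_eq_getElem vals 0 hklen
      have hcast : ((k : Int) + 1) = ((k + 1 : Nat) : Int) := by push_cast; ring
      rw [hget, hcast,
        innerB vals (fun v => cnt.getD v 0) (vals[k]) (cnt.getD (vals[k]) 0) ((k + 1 : Nat) : Int) (by positivity)]
      rw [Int.toNat_natCast]
      rw [ih (k + 1) _ (by omega)]
      rw [List.drop_eq_getElem_cons hklen]
      simp only [wSumB]
      ring

-- ---- the two ports, characterised ----

theorem solution_eq_pairSum (l : List Int) :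
    solution l = pairSum findGCD (l.drop 1) := by
  unfold solution
  have := outerA l l.length 1 0 (by omega)
  simpa using this

theorem solution_alt_eq_wSumB (l : List Int) :
    solution_alt l = wSumB (fun v => ((l.drop 1).count v : Int)) (PySem.List.dedup (l.drop 1)) := by
  unfold solution_alt
  simp only [PySem.List.slice_from_one]
  rw [show l.tail = l.drop 1 from List.drop_one.symm]
  set tail := l.drop 1 with htl
  set cnt := tail.foldl (fun d x => d.insert x (d.getD x 0 + 1)) (PySem.Dict.empty : PySem.Dict Int Int) with hcnt
  have hkeys : PySem.Dict.keys cnt = PySem.List.dedup tail := by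
    rw [hcnt, PySem.Dict.keys_foldl_insert]
    simp [PySem.Set.update, PySem.List.dedup_eq_ofList, PySem.Set.ofList_eq_foldl,
      PySem.Dict.keys_empty]
  have hgetD : ∀ v : Int, cnt.getD v 0 = (tail.count v : Int) := by
    intro v
    rw [hcnt, PySem.Dict.getD_foldl_insert_add_one]
    simp [PySem.Dict.getD_empty]
  have hcfun : (fun v => cnt.getD v 0) = (fun v => (tail.count v : Int)) := funext hgetD
  have := outerB (PySem.Dict.keys cnt) cnt (PySem.Dict.keys cnt).length 0 0 (by omega)
  simp only [Nat.cast_zero, List.drop_zero, zero_add] at this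
  rw [this, hcfun, hkeys]

-- ===== VERDICT (by name: the statement is the Claim_ definition above) =====
theorem solution_spec : Claim_equal_solution := by
  unfold Claim_equal_solution
  intro l _ hpre
  unfold Spec_solution
  rw [solution_eq_pairSum, solution_alt_eq_wSumB]
  rw [pairSum_congr_pairwise findGCD G (fun a b => 0 < a ∧ 0 < b)
    (fun a b hab => findGCD_eq_pos a b hab.1 hab.2) (l.drop 1) (pairwise_pos (l.drop 1) hpre)]
  rw [pairSum_eq_wSum G G_comm (l.drop 1)]
  refine (wSumB_eq_wSum _ (PySem.List.dedup (l.drop 1)) ?_).symm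
  intro v hv
  rw [PySem.List.dedup_eq_ofList] at hv
  exact hpre v ((PySem.Set.mem_ofList _ _).mp hv)
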